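-- pv_equiv track=rewrite | github.com/khangn7/cspc217 | assignments/CPSC217S23A3Board.py | win_in_diagonal_forward_slash
-- ===== SOURCE A (Python) =====
-- WIN_LENGTH = 3
--
-- def row_count(board) -> int:
--     """
--     returns the amount of rows in a 2d list returned by create_board()
--     :param board: list, the 2d list representing the tictactoe board
--     :return: int, amount of rows
--     """
--     return len(board)
--
-- def column_count(board) -> int:
--     """
--     returns the amount of columns in a 2d list returned by create_board()
--     :param board: list, the 2d list representing the tictactoe board
--     :return: int, amount of columns
--     """
--     return len(board[0])
--
-- def win_in_diagonal_forward_slash(board, piece):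
--     """
--     returns whether given piece won due to a "forward slash" diagonal
--     forward slash diagonal is sequence where every piece's row is 1 lower and column is 1 higher than previous piece
--     function checks if any diagonal of WIN_LENGTH exists where every piece is given piece
--     :param board: list, 2d list representing board
--     :param piece: int, should be constant representing player's piece
--     :return: bool, True if given piece wins, else False
--     """
--     # designed like win_in_diagonal_backslash()
--     ro_count = row_count(board)
--     col_count = column_count(board)
--     # checks from left to right
--     for start_x in range(col_count - WIN_LENGTH + 1):
--         for start_y in range(ro_count - 1, WIN_LENGTH - 2, -1):
--             # start_x and start_y here will be for the leftmost lowest box of diagonal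
--             in_a_row = 0
--             box_x = start_x
--             box_y = start_y
--             # check this diagonal
--             for i in range(WIN_LENGTH):
--                 if board[box_y][box_x] == piece:
--                     in_a_row += 1
--                 else:
--                     in_a_row = 0
--                 if in_a_row == WIN_LENGTH:
--                     return True
--                 box_x += 1
--                 box_y -= 1
--     return False
-- ===== SOURCE B (Python) =====
-- WIN_LENGTH = 3
--
-- def win_in_diagonal_forward_slash(board, piece):
--     """
--     Two staged passes: first materialize every anti-diagonal (cells with
--     constant row+col, walked bottom-left to top-right) as a list, then
--     scan each collected diagonal's 3-cell windows by index.
--     """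
--     rows = len(board)
--     cols = len(board[0])
--     diagonals = [
--         [board[y][s - y] for y in range(min(s, rows - 1), max(0, s - cols + 1) - 1, -1)]
--         for s in range(rows + cols - 1)
--     ]
--     for diag in diagonals:
--         for i in range(len(diag) - WIN_LENGTH + 1):
--             if diag[i] == piece and diag[i + 1] == piece and diag[i + 2] == piece:
--                 return True
--     return False
-- ===== Notes on version B (the rewrite author's own statement) =====
-- stated objective: alternative
-- what changed: B first materializes every anti-diagonal (constant row+col) as a list and then scans windows by index within each collected diagonal list, instead of A's direct enumeration of 3-cell windows over grid coordinates with a restarted in_a_row counter; each cell is fetched once per diagonal instead of once per window.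
-- outside the precondition, e.g. on win_in_diagonal_forward_slash([[0], []], 0): A returns False, B raises IndexError
import Mathlib
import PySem

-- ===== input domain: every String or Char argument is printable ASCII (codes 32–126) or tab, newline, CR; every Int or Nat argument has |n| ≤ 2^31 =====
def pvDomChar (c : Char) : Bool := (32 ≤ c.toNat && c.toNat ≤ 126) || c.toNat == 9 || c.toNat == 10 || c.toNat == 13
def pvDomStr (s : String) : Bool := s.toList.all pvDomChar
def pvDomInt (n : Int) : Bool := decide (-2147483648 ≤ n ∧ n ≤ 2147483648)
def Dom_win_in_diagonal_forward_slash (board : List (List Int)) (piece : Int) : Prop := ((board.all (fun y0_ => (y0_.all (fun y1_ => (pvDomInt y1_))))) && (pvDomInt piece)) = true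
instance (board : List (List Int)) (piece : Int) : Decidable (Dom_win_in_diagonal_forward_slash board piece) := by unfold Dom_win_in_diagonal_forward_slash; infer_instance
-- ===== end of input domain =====

-- B first materializes every anti-diagonal as a list and then scans each collected
-- diagonal's 3-cell windows by index — a collect-then-scan staging instead of A's
-- direct window enumeration with a restarted counter (objective: alternative).

-- ===== PORT A =====
-- board[y][x]; exact under Pre_ (all indices the loops reach are in range there)
def pvCell (board : List (List Int)) (y x : Int) : Int :=
  PySem.List.pyGetD (PySem.List.pyGetD board y []) x 0

def win_in_diagonal_forward_slash (board : List (List Int)) (piece : Int) : Bool :=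
  let ro_count : Int := (board.length : Int)
  let col_count : Int := ((PySem.List.pyGetD board 0 []).length : Int)
  (PySem.List.pyRange 0 (col_count - 3 + 1) 1).any (fun start_x =>
    (PySem.List.pyRange (ro_count - 1) (3 - 2) (-1)).any (fun start_y =>
      -- state: (returned-True, in_a_row, box_x, box_y)
      ((PySem.List.pyRange 0 3 1).foldl
        (fun (st : Bool × Int × Int × Int) _ =>
          if st.1 then st
          else
            let ia : Int := if pvCell board st.2.2.2 st.2.2.1 = piece then st.2.1 + 1 else 0
            (decide (ia = 3), ia, st.2.2.1 + 1, st.2.2.2 - 1))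
        (false, 0, start_x, start_y)).1))

-- ===== PORT B =====
def win_in_diagonal_forward_slash_alt (board : List (List Int)) (piece : Int) : Bool :=
  let rows : Int := (board.length : Int)
  let cols : Int := ((PySem.List.pyGetD board 0 []).length : Int)
  let diagonals : List (List Int) :=
    (PySem.List.pyRange 0 (rows + cols - 1) 1).map (fun s =>
      (PySem.List.pyRange (min s (rows - 1)) (max 0 (s - cols + 1) - 1) (-1)).map
        (fun y => PySem.List.pyGetD (PySem.List.pyGetD board y []) (s - y) 0))
  diagonals.any (fun diag =>
    (PySem.List.pyRange 0 ((diag.length : Int) - 3 + 1) 1).any (fun i =>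
      decide (PySem.List.pyGetD diag i 0 = piece) &&
      decide (PySem.List.pyGetD diag (i + 1) 0 = piece) &&
      decide (PySem.List.pyGetD diag (i + 2) 0 = piece)))

-- ===== PRECONDITION & SPEC =====
-- A raises IndexError on an empty board (len(board[0])); on ragged boards a row shorter than
-- row 0 raises when reached.  Pre_ requires a nonempty board whose rows are all at least as
-- long as row 0: slightly stronger than the exact no-raise condition (a short row the scan
-- never reaches — small board, or a win found first — is also excluded; B raises there too).
def Pre_win_in_diagonal_forward_slash (board : List (List Int)) (piece : Int) : Prop :=
  board ≠ [] ∧ ∀ row ∈ board, (PySem.List.pyGetD board 0 []).length ≤ row.length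
instance (board : List (List Int)) (piece : Int) : Decidable (Pre_win_in_diagonal_forward_slash board piece) := by unfold Pre_win_in_diagonal_forward_slash; infer_instance

def pvWitness_win_in_diagonal_forward_slash : List (List Int) × Int :=
  ([[1, 0, 1], [0, 1, 0], [1, 0, 0]], 1)

def Spec_win_in_diagonal_forward_slash (board : List (List Int)) (piece : Int) (out : Bool) : Prop := out = win_in_diagonal_forward_slash_alt board piece
instance (board : List (List Int)) (piece : Int) (out : Bool) : Decidable (Spec_win_in_diagonal_forward_slash board piece out) := by unfold Spec_win_in_diagonal_forward_slash; infer_instance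

-- ===== CLAIM (what is proved, stated in full; the proofs are below) =====
def Claim_equal_win_in_diagonal_forward_slash : Prop := ∀ (board : List (List Int)) (piece : Int), Dom_win_in_diagonal_forward_slash board piece → Pre_win_in_diagonal_forward_slash board piece → Spec_win_in_diagonal_forward_slash board piece (win_in_diagonal_forward_slash board piece)

-- ===== LEMMAS AND PROOFS =====

-- the common characterisation: a forward-slash 3-window fully inside the grid, all = piece
def pvWin (board : List (List Int)) (piece y x : Int) : Prop :=
  2 ≤ y ∧ y ≤ (board.length : Int) - 1 ∧
  0 ≤ x ∧ x ≤ ((PySem.List.pyGetD board 0 []).length : Int) - 3 ∧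
  pvCell board y x = piece ∧ pvCell board (y - 1) (x + 1) = piece ∧
  pvCell board (y - 2) (x + 2) = piece

lemma innerA (board : List (List Int)) (piece x y : Int) :
    ((PySem.List.pyRange 0 3 1).foldl
      (fun (st : Bool × Int × Int × Int) _ =>
        if st.1 then st
        else
          let ia : Int := if pvCell board st.2.2.2 st.2.2.1 = piece then st.2.1 + 1 else 0
          (decide (ia = 3), ia, st.2.2.1 + 1, st.2.2.2 - 1))
      (false, 0, x, y)).1
    = (decide (pvCell board y x = piece) && decide (pvCell board (y - 1) (x + 1) = piece)
        && decide (pvCell board (y - 2) (x + 2) = piece)) := by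
  have h3 : PySem.List.pyRange 0 3 1 = [0, 1, 2] := by decide
  have e1 : y - 1 - 1 = y - 2 := by ring
  have e2 : x + 1 + 1 = x + 2 := by ring
  rw [h3]
  by_cases h1 : pvCell board y x = piece <;>
    by_cases h2 : pvCell board (y - 1) (x + 1) = piece <;>
      by_cases hc : pvCell board (y - 2) (x + 2) = piece <;>
        simp [List.foldl, h1, h2, hc, e1, e2]

lemma A_char (board : List (List Int)) (piece : Int) :
    win_in_diagonal_forward_slash board piece = true ↔ ∃ y x, pvWin board piece y x := by
  unfold win_in_diagonal_forward_slash
  simp only [List.any_eq_true, innerA, Bool.and_eq_true, decide_eq_true_eq,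
    PySem.List.mem_pyRange_one, PySem.List.mem_pyRange_neg_one]
  constructor
  · rintro ⟨x, ⟨hx0, hx1⟩, y, ⟨hy0, hy1⟩, ⟨h1, h2⟩, h3⟩
    exact ⟨y, x, by omega, by omega, by omega, by omega, h1, h2, h3⟩
  · rintro ⟨y, x, hy2, hy1, hx0, hx1, h1, h2, h3⟩
    exact ⟨x, ⟨by omega, by omega⟩, y, ⟨by omega, by omega⟩, ⟨h1, h2⟩, h3⟩

-- indexing into a materialised anti-diagonal picks the cell at row hi - i
lemma diagGet (f : Int → Int) (hi lo1 i : Int) (h0 : 0 ≤ i) (h1 : i < hi - lo1) :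
    PySem.List.pyGetD ((PySem.List.pyRange hi lo1 (-1)).map f) i 0 = f (hi - i) := by
  rw [PySem.List.pyRange_neg_one, List.map_map]
  rw [PySem.List.pyGetD_eq_getElem _ _ h0
    (by simp [List.length_map, List.length_range]; omega)]
  simp only [List.getElem_map, List.getElem_range, Function.comp]
  congr 1
  omega

lemma B_char (board : List (List Int)) (piece : Int) :
    win_in_diagonal_forward_slash_alt board piece = true ↔ ∃ y x, pvWin board piece y x := by
  unfold win_in_diagonal_forward_slash_alt
  simp only [List.any_map, List.any_eq_true, Function.comp, Bool.and_eq_true,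
    decide_eq_true_eq, PySem.List.mem_pyRange_one, List.length_map,
    PySem.List.length_pyRange_neg_one]
  constructor
  · rintro ⟨s, ⟨hs0, hs1⟩, i, ⟨hi0, hi1⟩, ⟨h1, h2⟩, h3⟩
    set rows : Int := (board.length : Int) with hrows
    set cols : Int := ((PySem.List.pyGetD board 0 []).length : Int) with hcols
    set hi : Int := min s (rows - 1) with hhi
    set lo1 : Int := max 0 (s - cols + 1) - 1 with hlo1
    have hlen : ((hi - lo1).toNat : Int) = hi - lo1 := by omega
    rw [hlen] at hi1
    rw [diagGet _ hi lo1 i hi0 (by omega)] at h1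
    rw [diagGet _ hi lo1 (i + 1) (by omega) (by omega)] at h2
    rw [diagGet _ hi lo1 (i + 2) (by omega) (by omega)] at h3
    refine ⟨hi - i, s - (hi - i), by omega, by omega, by omega, by omega, h1, ?_, ?_⟩
    · have e1 : hi - i - 1 = hi - (i + 1) := by ring
      have e2 : s - (hi - i) + 1 = s - (hi - (i + 1)) := by ring
      rw [e1, e2]; exact h2
    · have e1 : hi - i - 2 = hi - (i + 2) := by ring
      have e2 : s - (hi - i) + 2 = s - (hi - (i + 2)) := by ring
      rw [e1, e2]; exact h3
  · rintro ⟨y, x, hy2, hy1, hx0, hx1, h1, h2, h3⟩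
    set rows : Int := (board.length : Int) with hrows
    set cols : Int := ((PySem.List.pyGetD board 0 []).length : Int) with hcols
    refine ⟨y + x, ⟨by omega, by omega⟩, ?_⟩
    set hi : Int := min (y + x) (rows - 1) with hhi
    set lo1 : Int := max 0 (y + x - cols + 1) - 1 with hlo1
    have hlen : ((hi - lo1).toNat : Int) = hi - lo1 := by omega
    refine ⟨hi - y, ⟨by omega, by omega⟩, ⟨?_, ?_⟩, ?_⟩
    · rw [diagGet _ hi lo1 (hi - y) (by omega) (by omega)]
      have e : hi - (hi - y) = y := by ring
      rw [e]
      have e2 : y + x - y = x := by ring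
      rw [e2]; exact h1
    · rw [diagGet _ hi lo1 (hi - y + 1) (by omega) (by omega)]
      have e : hi - (hi - y + 1) = y - 1 := by ring
      rw [e]
      have e2 : y + x - (y - 1) = x + 1 := by ring
      rw [e2]; exact h2
    · rw [diagGet _ hi lo1 (hi - y + 2) (by omega) (by omega)]
      have e : hi - (hi - y + 2) = y - 2 := by ring
      rw [e]
      have e2 : y + x - (y - 2) = x + 2 := by ring
      rw [e2]; exact h3

-- ===== VERDICT (by name: the statement is the Claim_ definition above) =====
theorem win_in_diagonal_forward_slash_spec : Claim_equal_win_in_diagonal_forward_slash := by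
  intro board piece _ _
  unfold Spec_win_in_diagonal_forward_slash
  rw [Bool.eq_iff_iff, A_char, B_char]
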